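-- pv_equiv track=rewrite | github.com/mouadouad/MineSweeper-bot | mineSweeper.py | shared_empties
-- ===== SOURCE A (Python) =====
-- grid_height = 16
--
-- grid_width = 30
--
-- def adjacent(i, j):
--     adjacentlist = []
--     if i != 0:
--         adjacentlist.append((i - 1, j))
--         if j != 0:
--             adjacentlist.append((i - 1, j - 1))
--         if j != grid_width:
--             adjacentlist.append((i - 1, j + 1))
--     if i != grid_height:
--         adjacentlist.append((i + 1, j))
--         if j != 0:
--             adjacentlist.append((i + 1, j - 1))
--         if j != grid_width:
--             adjacentlist.append((i + 1, j + 1))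
--     if j != 0:
--         adjacentlist.append((i, j - 1))
--     if j != grid_width:
--         adjacentlist.append((i, j + 1))
--     return adjacentlist
--
-- def num_empties(empties, adjacent):
--     list_empties = []
--     if empties == None:
--         return list_empties
--     for i in adjacent:
--         if i in empties:
--             list_empties.append(i)
--     return list_empties
--
-- def num_bombs(bombs, adjacent):
--     list_bombs = []
--     for i in adjacent:
--         if i in bombs:
--             list_bombs.append(i)
--     return list_bombs
--
-- def shared_empties(numbers, bombs, empties, number):
--     adjacentV = adjacent(*number)
--     num_emptiesV = num_empties(empties, adjacentV)
--     num_bombsV = num_bombs(bombs, adjacentV)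
--     dict_of_numbers = {}
--     result_list = []
--     for empty in num_emptiesV:
--         for i in adjacent(*empty): #check the adjacent cases of each empty case and find if it is a number
--             if i in numbers and i != number:
--                 if i in dict_of_numbers: #if it is a number and not the number we are working on and add it to the dictionnary or add 1
--                     dict_of_numbers[i] += 1
--                 else:
--                     dict_of_numbers[i] = 1
--                 #the dictionnary contains how many shared empties the numbers have with the working number > 0
--     for number in dict_of_numbers:#check for the numbers that we found have shared empties with our number, share all the empties with him
--         if dict_of_numbers[number] == len(num_emptiesV):
--             result_list.append(number)
--     return result_list, num_emptiesV, len(num_bombsV)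
-- ===== SOURCE B (Python) =====
-- grid_height = 16
--
-- grid_width = 30
--
-- def adjacent(i, j):
--     adjacentlist = []
--     if i != 0:
--         adjacentlist.append((i - 1, j))
--         if j != 0:
--             adjacentlist.append((i - 1, j - 1))
--         if j != grid_width:
--             adjacentlist.append((i - 1, j + 1))
--     if i != grid_height:
--         adjacentlist.append((i + 1, j))
--         if j != 0:
--             adjacentlist.append((i + 1, j - 1))
--         if j != grid_width:
--             adjacentlist.append((i + 1, j + 1))
--     if j != 0:
--         adjacentlist.append((i, j - 1))
--     if j != grid_width:
--         adjacentlist.append((i, j + 1))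
--     return adjacentlist
--
-- def shared_empties(numbers, bombs, empties, number):
--     adjacentV = adjacent(*number)
--     num_emptiesV = [c for c in adjacentV if empties is not None and c in empties]
--     bomb_count = sum(1 for c in adjacentV if c in bombs)
--     if not num_emptiesV:
--         return [], num_emptiesV, bomb_count
--     # a cell shares ALL empties iff it is adjacent to every empty; candidates in the
--     # order of the first empty's adjacency scan reproduce dict-insertion order
--     other_adj = [set(adjacent(*e)) for e in num_emptiesV[1:]]
--     result_list = [c for c in adjacent(*num_emptiesV[0])
--                    if c in numbers and c != number and all(c in s for s in other_adj)]
--     return result_list, num_emptiesV, bomb_count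
-- ===== Notes on version B (the rewrite author's own statement) =====
-- stated objective: simpler
-- what changed: Replaces A's occurrence-counting dict plus a second key-filtering pass by a direct set-intersection test: a candidate cell is kept iff it lies in the adjacency of every empty, scanning only the first empty's adjacency (which reproduces A's dict-insertion order).
import Mathlib
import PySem

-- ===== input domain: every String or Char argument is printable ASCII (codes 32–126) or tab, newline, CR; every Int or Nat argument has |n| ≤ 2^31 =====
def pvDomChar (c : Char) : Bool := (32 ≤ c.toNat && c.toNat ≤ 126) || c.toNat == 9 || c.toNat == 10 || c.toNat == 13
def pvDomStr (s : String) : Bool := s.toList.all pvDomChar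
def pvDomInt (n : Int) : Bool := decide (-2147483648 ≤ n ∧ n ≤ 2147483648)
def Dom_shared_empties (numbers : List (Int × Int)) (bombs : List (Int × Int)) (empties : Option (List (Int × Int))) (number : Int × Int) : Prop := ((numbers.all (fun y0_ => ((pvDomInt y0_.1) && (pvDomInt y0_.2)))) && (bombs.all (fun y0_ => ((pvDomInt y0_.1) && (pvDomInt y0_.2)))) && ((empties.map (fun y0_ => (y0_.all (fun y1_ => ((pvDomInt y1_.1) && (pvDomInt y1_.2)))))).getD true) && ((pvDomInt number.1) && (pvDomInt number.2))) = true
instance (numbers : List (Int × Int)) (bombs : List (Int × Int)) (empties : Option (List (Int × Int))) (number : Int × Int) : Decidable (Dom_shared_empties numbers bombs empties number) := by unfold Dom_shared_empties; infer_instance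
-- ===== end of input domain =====

-- B replaces A's occurrence-counting dict and second key-scanning pass by a direct
-- "adjacent to every empty" membership test (objective: simpler).

-- ===== PORT A =====
-- module constants and the shared module helper `adjacent`
def gridHeight : Int := 16
def gridWidth : Int := 30

def pyAdjacent (i j : Int) : List (Int × Int) :=
  let l : List (Int × Int) := []
  let l := if i ≠ 0 then
      let l := l ++ [(i - 1, j)]
      let l := if j ≠ 0 then l ++ [(i - 1, j - 1)] else l
      if j ≠ gridWidth then l ++ [(i - 1, j + 1)] else l
    else l
  let l := if i ≠ gridHeight then
      let l := l ++ [(i + 1, j)]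
      let l := if j ≠ 0 then l ++ [(i + 1, j - 1)] else l
      if j ≠ gridWidth then l ++ [(i + 1, j + 1)] else l
    else l
  let l := if j ≠ 0 then l ++ [(i, j - 1)] else l
  if j ≠ gridWidth then l ++ [(i, j + 1)] else l

def numEmptiesA (empties : Option (List (Int × Int))) (adj : List (Int × Int)) : List (Int × Int) :=
  match empties with
  | none => []
  | some es => adj.foldl (fun acc i => if i ∈ es then acc ++ [i] else acc) []

def numBombsA (bombs : List (Int × Int)) (adj : List (Int × Int)) : List (Int × Int) :=
  adj.foldl (fun acc i => if i ∈ bombs then acc ++ [i] else acc) []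

def shared_empties (numbers : List (Int × Int)) (bombs : List (Int × Int)) (empties : Option (List (Int × Int))) (number : Int × Int) : (List (Int × Int)) × (List (Int × Int)) × Int :=
  let adjacentV := pyAdjacent number.1 number.2
  let numEmptiesV := numEmptiesA empties adjacentV
  let numBombsV := numBombsA bombs adjacentV
  let d := numEmptiesV.foldl (fun d e =>
      (pyAdjacent e.1 e.2).foldl (fun d i =>
        if i ∈ numbers ∧ i ≠ number then
          (if d.contains i then d.modify i 0 (· + 1) else d.insert i 1)
        else d) d) (PySem.Dict.empty : PySem.Dict (Int × Int) Int)
  let result := d.keys.foldl (fun acc k =>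
      if d.getD k 0 = (numEmptiesV.length : Int) then acc ++ [k] else acc) []
  (result, numEmptiesV, (numBombsV.length : Int))

-- ===== PORT B =====
def shared_empties_alt (numbers : List (Int × Int)) (bombs : List (Int × Int)) (empties : Option (List (Int × Int))) (number : Int × Int) : (List (Int × Int)) × (List (Int × Int)) × Int :=
  let adjacentV := pyAdjacent number.1 number.2
  let numEmptiesV := adjacentV.filter (fun c =>
      match empties with
      | none => false
      | some es => decide (c ∈ es))
  let bombCount : Int := (adjacentV.countP (fun c => decide (c ∈ bombs)) : Int)
  match numEmptiesV with
  | [] => ([], [], bombCount)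
  | e0 :: rest =>
    let otherAdj := rest.map (fun e => PySem.Set.ofList (pyAdjacent e.1 e.2))
    let result := (pyAdjacent e0.1 e0.2).filter (fun c =>
        decide (c ∈ numbers) && decide (c ≠ number) && otherAdj.all (fun s => decide (c ∈ s)))
    (result, e0 :: rest, bombCount)

-- ===== PRECONDITION & SPEC =====
def Spec_shared_empties (numbers : List (Int × Int)) (bombs : List (Int × Int)) (empties : Option (List (Int × Int))) (number : Int × Int) (out : (List (Int × Int)) × (List (Int × Int)) × Int) : Prop := out = shared_empties_alt numbers bombs empties number
instance (numbers : List (Int × Int)) (bombs : List (Int × Int)) (empties : Option (List (Int × Int))) (number : Int × Int) (out : (List (Int × Int)) × (List (Int × Int)) × Int) : Decidable (Spec_shared_empties numbers bombs empties number out) := by unfold Spec_shared_empties; infer_instance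

-- ===== CLAIM (what is proved, stated in full; the proofs are below) =====
def Claim_equal_shared_empties : Prop := ∀ (numbers : List (Int × Int)) (bombs : List (Int × Int)) (empties : Option (List (Int × Int))) (number : Int × Int), Dom_shared_empties numbers bombs empties number → Spec_shared_empties numbers bombs empties number (shared_empties numbers bombs empties number)

-- ===== LEMMAS AND PROOFS =====

-- adjacency lists never repeat a cell
lemma pyAdjacent_nodup (i j : Int) : (pyAdjacent i j).Nodup := by
  unfold pyAdjacent
  split_ifs <;>
    simp_all [List.nodup_cons, Prod.ext_iff, gridWidth, gridHeight] <;> omega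

-- a list of numbers each ≤ 1 sums to its length iff every entry is 1
lemma sum_eq_length_iff (l : List Nat) (h : ∀ x ∈ l, x ≤ 1) :
    (l.sum = l.length ↔ ∀ x ∈ l, x = 1) := by
  induction l with
  | nil => simp
  | cons a t ih =>
    simp only [List.sum_cons, List.length_cons, List.mem_cons, forall_eq_or_imp] at *
    have ht := ih h.2
    have hs : t.sum ≤ t.length := by
      have := List.sum_le_card_nsmul t 1 (by intro x hx; exact h.2 x hx)
      simpa using this
    constructor
    · intro hsum
      have ha : a = 1 := by omega
      have hts : t.sum = t.length := by omega
      exact ⟨ha, ht.mp hts⟩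
    · rintro ⟨ha, hall⟩
      have := ht.mpr hall
      omega

-- updating a set with elements that can only re-occur leaves a filter unchanged
lemma filter_update (Q : (Int × Int) → Bool) (s : PySem.Set (Int × Int))
    (xs : List (Int × Int)) (h : ∀ x ∈ xs, Q x = true → x ∈ s) :
    (PySem.Set.update s xs).filter Q = s.filter Q := by
  induction xs generalizing s with
  | nil => rfl
  | cons x t ih =>
    have hstep : (PySem.Set.add s x).filter Q = s.filter Q := by
      by_cases hx : x ∈ s
      · simp [PySem.Set.add, PySem.Set.contains, hx]
      · have hq : Q x = false := by
          cases hQ : Q x with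
          | false => rfl
          | true => exact absurd (h x (by simp) hQ) hx
        simp [PySem.Set.add, PySem.Set.contains, hx, List.filter_append, hq]
    have hsub : ∀ y ∈ t, Q y = true → y ∈ PySem.Set.add s x := by
      intro y hy hQ
      exact (PySem.Set.mem_add s x y).mpr (Or.inl (h y (by simp [hy]) hQ))
    calc (PySem.Set.update s (x :: t)).filter Q
        = (PySem.Set.update (PySem.Set.add s x) t).filter Q := rfl
      _ = (PySem.Set.add s x).filter Q := ih _ hsub
      _ = s.filter Q := hstep

-- each loop-body update of A's dict is the counter update
lemma step_eq (numbers : List (Int × Int)) (number : Int × Int)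
    (d : PySem.Dict (Int × Int) Int) (i : Int × Int) :
    (if i ∈ numbers ∧ i ≠ number then
        (if d.contains i then d.modify i 0 (· + 1) else d.insert i 1)
      else d)
    = (if i ∈ numbers ∧ i ≠ number then d.modify i 0 (· + 1) else d) := by
  by_cases hc : i ∈ numbers ∧ i ≠ number
  · simp only [if_pos hc]
    by_cases hk : d.contains i
    · simp [hk]
    · have hk' : d.contains i = false := by simpa using hk
      have h0 : d.getD i 0 = 0 := PySem.Dict.getD_of_not_contains _ _ hk'
      simp [hk, PySem.Dict.modify, h0]
  · simp [hc]

-- nested loop over empties = one counter fold over the concatenated candidate lists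
lemma foldl_foldl_eq_flatMap {α β δ : Type} (g : α → List β) (f : δ → β → δ)
    (E : List α) (init : δ) :
    E.foldl (fun d e => (g e).foldl f d) init = (E.flatMap g).foldl f init := by
  induction E generalizing init with
  | nil => rfl
  | cons e t ih => simp [List.flatMap_cons, List.foldl_append, ih]

-- in a duplicate-free list, count is 1 on members and 0 elsewhere
lemma count_nodup (l : List (Int × Int)) (h : l.Nodup) (a : Int × Int) :
    l.count a = if a ∈ l then 1 else 0 := by
  by_cases hm : a ∈ l
  · simp only [if_pos hm]
    exact Nat.le_antisymm (List.nodup_iff_count_le_one.mp h a)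
      (List.count_pos_iff.mpr hm)
  · simp [List.count_eq_zero_of_not_mem hm, hm]

-- the count over all candidate blocks hits |E| exactly on cells adjacent to every empty
lemma count_eq_length_iff (P : (Int × Int) → Bool) (E : List (Int × Int)) (k : Int × Int) :
    ((E.flatMap (fun e => (pyAdjacent e.1 e.2).filter P)).count k = E.length
      ↔ ∀ e ∈ E, P k = true ∧ k ∈ pyAdjacent e.1 e.2) := by
  have hterm : ∀ e : Int × Int,
      ((pyAdjacent e.1 e.2).filter P).count k
        = if P k = true ∧ k ∈ pyAdjacent e.1 e.2 then 1 else 0 := by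
    intro e
    by_cases hP : P k = true
    · rw [List.count_filter hP, count_nodup _ (pyAdjacent_nodup e.1 e.2)]
      by_cases hm : k ∈ pyAdjacent e.1 e.2 <;> simp [hm, hP]
    · have : k ∉ (pyAdjacent e.1 e.2).filter P := by
        intro hmem; exact hP (List.of_mem_filter hmem)
      simp [List.count_eq_zero_of_not_mem this, hP]
  rw [List.count_flatMap]
  have hlen : (E.map (fun e => ((pyAdjacent e.1 e.2).filter P).count k)).length = E.length := by
    simp
  have hle : ∀ x ∈ E.map (fun e => ((pyAdjacent e.1 e.2).filter P).count k), x ≤ 1 := by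
    intro x hx
    rcases List.mem_map.mp hx with ⟨e, _, rfl⟩
    rw [hterm e]; split <;> omega
  have := sum_eq_length_iff _ hle
  rw [hlen] at this
  have hcomp : (E.map (List.count k ∘ fun e => (pyAdjacent e.1 e.2).filter P))
      = E.map (fun e => ((pyAdjacent e.1 e.2).filter P).count k) := rfl
  rw [hcomp, this]
  constructor
  · intro hall e he
    have := hall _ (List.mem_map.mpr ⟨e, he, rfl⟩)
    rw [hterm e] at this
    by_contra hcon
    rw [if_neg hcon] at this
    omega
  · intro hall x hx
    rcases List.mem_map.mp hx with ⟨e, he, rfl⟩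
    rw [hterm e, if_pos (hall e he)]

-- sets built from duplicate-free lists are those lists
lemma update_nodup (s l : List (Int × Int)) (h : (s ++ l).Nodup) :
    PySem.Set.update s l = s ++ l := by
  induction l generalizing s with
  | nil => simp [PySem.Set.update]
  | cons x t ih =>
    have hx : x ∉ s := by
      intro hmem
      exact (List.disjoint_of_nodup_append h) hmem (by simp)
    have hadd : PySem.Set.add s x = s ++ [x] := by
      simp [PySem.Set.add, PySem.Set.contains, hx]
    have hperm : (s ++ x :: t).Perm ((s ++ [x]) ++ t) := by
      simp
    have h2 : ((s ++ [x]) ++ t).Nodup := hperm.nodup h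
    calc PySem.Set.update s (x :: t)
        = PySem.Set.update (PySem.Set.add s x) t := rfl
      _ = PySem.Set.update (s ++ [x]) t := by rw [hadd]
      _ = (s ++ [x]) ++ t := ih _ h2
      _ = s ++ x :: t := by simp

lemma ofList_nodup (l : List (Int × Int)) (h : l.Nodup) : PySem.Set.ofList l = l := by
  have : PySem.Set.ofList l = PySem.Set.update [] l := rfl
  rw [this, update_nodup [] l (by simp [h])]
  simp

lemma numEmpties_eq (empties : Option (List (Int × Int))) (adj : List (Int × Int)) :
    numEmptiesA empties adj
      = adj.filter (fun c => match empties with | none => false | some es => decide (c ∈ es)) := by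
  cases empties with
  | none => simp [numEmptiesA]
  | some es =>
    simpa [numEmptiesA] using
      PySem.List.foldl_append_ite_eq_filter (fun i => i ∈ es) adj []

lemma numBombs_len (bombs adj : List (Int × Int)) :
    (numBombsA bombs adj).length = adj.countP (fun c => decide (c ∈ bombs)) := by
  unfold numBombsA
  rw [PySem.List.foldl_append_ite_eq_filter]
  simp [List.countP_eq_length_filter]

lemma dict_eq_counter (numbers : List (Int × Int)) (number : Int × Int)
    (E : List (Int × Int)) :
    E.foldl (fun d e =>
        (pyAdjacent e.1 e.2).foldl (fun d i =>
          if i ∈ numbers ∧ i ≠ number then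
            (if d.contains i then d.modify i 0 (· + 1) else d.insert i 1)
          else d) d) (PySem.Dict.empty : PySem.Dict (Int × Int) Int)
      = PySem.Dict.counter (E.flatMap
          (fun e => (pyAdjacent e.1 e.2).filter (fun i => decide (i ∈ numbers ∧ i ≠ number)))) := by
  simp only [step_eq numbers number]
  have h1 : ∀ (d : PySem.Dict (Int × Int) Int) (e : Int × Int),
      (pyAdjacent e.1 e.2).foldl (fun d i =>
          if i ∈ numbers ∧ i ≠ number then d.modify i 0 (· + 1) else d) d
        = ((pyAdjacent e.1 e.2).filter (fun i => decide (i ∈ numbers ∧ i ≠ number))).foldl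
            (fun d i => d.modify i 0 (· + 1)) d := fun d e =>
    PySem.List.foldl_ite_eq_foldl_filter _ _ _ _
  simp only [h1]
  rw [foldl_foldl_eq_flatMap, ← PySem.Dict.counter_eq_foldl]

-- the heart: A's key scan over the counter equals B's first-empty scan
lemma main_filter (numbers : List (Int × Int)) (number e0 : Int × Int)
    (rest : List (Int × Int)) :
    (PySem.Set.ofList ((e0 :: rest).flatMap
        (fun e => (pyAdjacent e.1 e.2).filter (fun i => decide (i ∈ numbers ∧ i ≠ number))))).filter
      (fun k => decide ((((e0 :: rest).flatMap
        (fun e => (pyAdjacent e.1 e.2).filter (fun i => decide (i ∈ numbers ∧ i ≠ number)))).count k : Int)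
          = ((e0 :: rest).length : Int)))
    = (pyAdjacent e0.1 e0.2).filter (fun c =>
        decide (c ∈ numbers) && decide (c ≠ number)
          && (rest.map (fun e => PySem.Set.ofList (pyAdjacent e.1 e.2))).all
              (fun s => decide (c ∈ s))) := by
  set P : (Int × Int) → Bool := fun i => decide (i ∈ numbers ∧ i ≠ number) with hPdef
  set g : (Int × Int) → List (Int × Int) := fun e => (pyAdjacent e.1 e.2).filter P with hgdef
  have hQ : ∀ k : Int × Int,
      (((((e0 :: rest).flatMap g).count k : Nat) : Int) = (((e0 :: rest).length : Nat) : Int))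
        ↔ ∀ e ∈ e0 :: rest, P k = true ∧ k ∈ pyAdjacent e.1 e.2 := by
    intro k
    rw [Int.natCast_inj]
    exact count_eq_length_iff P (e0 :: rest) k
  have hnodup0 : (g e0).Nodup := (pyAdjacent_nodup e0.1 e0.2).filter P
  have hflat : (e0 :: rest).flatMap g = g e0 ++ rest.flatMap g := by
    simp [List.flatMap_cons]
  rw [hflat, PySem.Set.ofList_append, ofList_nodup _ hnodup0]
  rw [filter_update _ _ _ (by
    intro x _ hx
    rw [← hflat] at hx
    have := (hQ x).mp (of_decide_eq_true hx)
    rcases this e0 (by simp) with ⟨hp, hm⟩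
    exact List.mem_filter.mpr ⟨hm, hp⟩)]
  rw [hgdef]
  simp only [List.filter_filter]
  apply List.filter_congr
  intro c hc
  rw [← hflat]
  rw [Bool.eq_iff_iff]
  simp only [Bool.and_eq_true, decide_eq_true_iff, List.all_map, List.all_eq_true,
    Function.comp, PySem.Set.mem_ofList]
  constructor
  · rintro ⟨hQc, hP⟩
    have hall := (hQ c).mp hQc
    have hp : c ∈ numbers ∧ c ≠ number := by
      have := (hall e0 (by simp)).1
      rwa [hPdef, decide_eq_true_iff] at this
    exact ⟨⟨hp.1, hp.2⟩, fun e he => (hall e (by simp [he])).2⟩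
  · rintro ⟨⟨h1, h2⟩, h3⟩
    have hp : P c = true := by rw [hPdef]; exact decide_eq_true ⟨h1, h2⟩
    refine ⟨(hQ c).mpr ?_, hp⟩
    intro e he
    rcases List.mem_cons.mp he with rfl | he'
    · exact ⟨hp, hc⟩
    · exact ⟨hp, h3 e he'⟩

theorem shared_empties_eq_alt (numbers : List (Int × Int)) (bombs : List (Int × Int))
    (empties : Option (List (Int × Int))) (number : Int × Int) :
    shared_empties numbers bombs empties number = shared_empties_alt numbers bombs empties number := by
  simp only [shared_empties, shared_empties_alt, numEmpties_eq, numBombs_len,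
    dict_eq_counter]
  cases hE : (pyAdjacent number.1 number.2).filter
      (fun c => match empties with | none => false | some es => decide (c ∈ es)) with
  | nil =>
    simp [PySem.Dict.counter, PySem.Dict.empty, PySem.Dict.keys]
  | cons e0 rest =>
    simp only [PySem.Dict.keys_counter, PySem.Dict.getD_counter]
    rw [PySem.List.foldl_append_ite_eq_filter, List.nil_append,
      main_filter numbers number e0 rest]

-- ===== VERDICT (by name: the statement is the Claim_ definition above) =====
theorem shared_empties_spec : Claim_equal_shared_empties := by
  intro numbers bombs empties number _
  exact shared_empties_eq_alt numbers bombs empties number
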